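-- pv_equiv track=rewrite | github.com/AlexLacour/advent-of-code-monorepo | 2023/scripts/5.py | apply_component_maps_to_range
-- ===== SOURCE A (Python) =====
-- def apply_component_maps_to_range(
--     range_to_udpate: tuple, component_maps: list
-- ) -> list[tuple]:
--     value_start, value_length = range_to_udpate
--     _value_end = value_start + value_length
--
--     for map_id, component_map in enumerate(component_maps):
--         dst_start, src_start, length = component_map
--         _src_end = src_start + length
--
--         transformation = dst_start - src_start
--
--         # no split, all transform
--         if src_start <= value_start and _value_end <= _src_end:  # case 1
--             return [(value_start + transformation, value_length)]
--
--         # split in 2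
--         elif value_start < src_start and (src_start < _value_end <= _src_end):  # case 2
--             out_tuple = (value_start, src_start - value_start)
--             in_tuple = (dst_start, _value_end - src_start)
--             return [
--                 *apply_component_maps_to_range(out_tuple, component_maps[map_id + 1 :]),
--                 in_tuple,
--             ]
--
--         # split in 2
--         elif src_start <= value_start < _src_end and _src_end < _value_end:  # case 2b
--             in_tuple = (dst_start + value_start - src_start, _src_end - value_start)
--             out_tuple = (_src_end, _value_end - _src_end)
--
--             return [
--                 *apply_component_maps_to_range(out_tuple, component_maps[map_id + 1 :]),
--                 in_tuple,
--             ]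
--
--         # split in 3
--         elif value_start <= src_start and _src_end <= _value_end:  # case 3
--             left_tuple = (value_start, src_start - value_start)
--             mid_tuple = (dst_start, length)
--             right_tuple = (_src_end, _value_end - _src_end)
--             return [
--                 *apply_component_maps_to_range(
--                     left_tuple, component_maps[map_id + 1 :]
--                 ),
--                 mid_tuple,
--                 *apply_component_maps_to_range(
--                     right_tuple, component_maps[map_id + 1 :]
--                 ),
--             ]
--
--     return [range_to_udpate]
-- ===== SOURCE B (Python) =====
-- def apply_component_maps_to_range(range_to_udpate, component_maps):
--     out = []
--     stack = [("expand", tuple(range_to_udpate), list(component_maps))]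
--     while stack:
--         item = stack.pop()
--         if item[0] == "emit":
--             out.append(item[1])
--             continue
--         _, (vs, vl), maps = item
--         ve = vs + vl
--         for i, (ds, ss, ln) in enumerate(maps):
--             se = ss + ln
--             rest = maps[i + 1:]
--             if ss <= vs and ve <= se:  # fully inside: transform whole range
--                 stack.append(("emit", (vs + ds - ss, vl)))
--                 break
--             elif vs < ss and ss < ve <= se:  # overlap on the right of ss
--                 stack.append(("emit", (ds, ve - ss)))
--                 stack.append(("expand", (vs, ss - vs), rest))
--                 break
--             elif ss <= vs < se and se < ve:  # overlap on the left of se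
--                 stack.append(("emit", (ds + vs - ss, se - vs)))
--                 stack.append(("expand", (se, ve - se), rest))
--                 break
--             elif vs <= ss and se <= ve:  # map strictly inside: split in three
--                 stack.append(("expand", (se, ve - se), rest))
--                 stack.append(("emit", (ds, ln)))
--                 stack.append(("expand", (vs, ss - vs), rest))
--                 break
--         else:
--             stack.append(("emit", (vs, vl)))
--     return out
-- ===== Notes on version B (the rewrite author's own statement) =====
-- stated objective: alternative
-- what changed: Replaced the recursive splitting (calls on the map-list suffix, results spliced around the transformed piece) with an iterative explicit stack of emit/expand work items pushed in reverse emission order, so popping reproduces the same left-to-right output.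
import Mathlib
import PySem

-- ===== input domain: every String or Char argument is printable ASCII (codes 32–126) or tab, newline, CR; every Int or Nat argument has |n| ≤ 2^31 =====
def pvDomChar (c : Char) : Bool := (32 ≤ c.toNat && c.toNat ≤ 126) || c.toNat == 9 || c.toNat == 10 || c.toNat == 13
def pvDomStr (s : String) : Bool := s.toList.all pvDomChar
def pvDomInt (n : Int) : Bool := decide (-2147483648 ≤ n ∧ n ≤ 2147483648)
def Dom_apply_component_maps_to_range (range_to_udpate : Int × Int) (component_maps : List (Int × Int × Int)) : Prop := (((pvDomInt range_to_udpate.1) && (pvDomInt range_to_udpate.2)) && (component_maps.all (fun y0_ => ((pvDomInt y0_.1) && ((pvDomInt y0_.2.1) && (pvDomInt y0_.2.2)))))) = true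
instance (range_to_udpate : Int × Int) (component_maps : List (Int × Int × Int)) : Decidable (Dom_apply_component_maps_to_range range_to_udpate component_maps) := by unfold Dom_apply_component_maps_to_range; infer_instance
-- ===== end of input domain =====

-- B replaces A's recursion (first matching map splits the range, recursing on the
-- map-list suffix) by an explicit work stack of emit/expand items pushed in reverse
-- emission order; objective: alternative decomposition, same output order and values.

-- ===== PORT A =====
-- A's enumerate-loop with first-match return and recursion on component_maps[map_id+1:]
-- is transliterated as structural recursion on the list: a non-matching head continues
-- with the tail (same range), the final fall-through returns [range_to_udpate].
def apply_component_maps_to_range (range_to_udpate : Int × Int) (component_maps : List (Int × Int × Int)) : List (Int × Int) :=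
  match component_maps with
  | [] => [range_to_udpate]
  | (dst_start, src_start, length) :: rest =>
    let value_start := range_to_udpate.1
    let value_length := range_to_udpate.2
    let _value_end := value_start + value_length
    let _src_end := src_start + length
    let transformation := dst_start - src_start
    if src_start ≤ value_start ∧ _value_end ≤ _src_end then  -- case 1
      [(value_start + transformation, value_length)]
    else if value_start < src_start ∧ (src_start < _value_end ∧ _value_end ≤ _src_end) then  -- case 2
      apply_component_maps_to_range (value_start, src_start - value_start) rest
        ++ [(dst_start, _value_end - src_start)]
    else if (src_start ≤ value_start ∧ value_start < _src_end) ∧ _src_end < _value_end then  -- case 2b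
      apply_component_maps_to_range (_src_end, _value_end - _src_end) rest
        ++ [(dst_start + value_start - src_start, _src_end - value_start)]
    else if value_start ≤ src_start ∧ _src_end ≤ _value_end then  -- case 3
      apply_component_maps_to_range (value_start, src_start - value_start) rest
        ++ (dst_start, length)
        :: apply_component_maps_to_range (_src_end, _value_end - _src_end) rest
    else
      apply_component_maps_to_range range_to_udpate rest

-- ===== PORT B =====
-- Work item of Source B's stack: ("emit", tuple) or ("expand", range, maps-suffix).
inductive PvItem where
  | emit : Int × Int → PvItem
  | expand : Int × Int → List (Int × Int × Int) → PvItem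
deriving DecidableEq, Repr

-- Source B's inner for-loop over maps with first-match break: the items pushed
-- (listed top-of-stack first; head of the result = last Python append).
def pvFindPush (vs vl : Int) : List (Int × Int × Int) → List PvItem
  | [] => [.emit (vs, vl)]
  | (ds, ss, ln) :: rest =>
    let ve := vs + vl
    let se := ss + ln
    if ss ≤ vs ∧ ve ≤ se then
      [.emit (vs + ds - ss, vl)]
    else if vs < ss ∧ (ss < ve ∧ ve ≤ se) then
      [.expand (vs, ss - vs) rest, .emit (ds, ve - ss)]
    else if (ss ≤ vs ∧ vs < se) ∧ se < ve then
      [.expand (se, ve - se) rest, .emit (ds + vs - ss, se - vs)]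
    else if vs ≤ ss ∧ se ≤ ve then
      [.expand (vs, ss - vs) rest, .emit (ds, ln), .expand (se, ve - se) rest]
    else
      pvFindPush vs vl rest

-- termination measure for the while-loop
def pvWeight : PvItem → Nat
  | .emit _ => 1
  | .expand _ maps => 2 * 4 ^ maps.length

def pvStackWeight (s : List PvItem) : Nat := (s.map pvWeight).sum

theorem pvFindPush_weight (vs vl : Int) (maps : List (Int × Int × Int)) :
    pvStackWeight (pvFindPush vs vl maps) < 2 * 4 ^ maps.length := by
  induction maps with
  | nil => simp [pvFindPush, pvStackWeight, pvWeight]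
  | cons m rest ih =>
    obtain ⟨ds, ss, ln⟩ := m
    have h4 : 1 ≤ 4 ^ rest.length := Nat.one_le_pow _ _ (by norm_num)
    simp only [pvFindPush, List.length_cons, pow_succ]
    split_ifs <;> simp_all [pvStackWeight, pvWeight] <;> omega

-- Source B's while-loop: head of the list = top of the stack; out is appended to.
def pvRun : List PvItem → List (Int × Int) → List (Int × Int)
  | [], out => out
  | .emit t :: rest, out => pvRun rest (out ++ [t])
  | .expand (vs, vl) maps :: rest, out => pvRun (pvFindPush vs vl maps ++ rest) out
termination_by s _ => pvStackWeight s
decreasing_by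
  · simp [pvStackWeight, pvWeight]
  · have := pvFindPush_weight vs vl maps
    simp_all [pvStackWeight, pvWeight]

def apply_component_maps_to_range_alt (range_to_udpate : Int × Int) (component_maps : List (Int × Int × Int)) : List (Int × Int) :=
  pvRun [.expand range_to_udpate component_maps] []

-- ===== PRECONDITION & SPEC =====
def Spec_apply_component_maps_to_range (range_to_udpate : Int × Int) (component_maps : List (Int × Int × Int)) (out : List (Int × Int)) : Prop := out = apply_component_maps_to_range_alt range_to_udpate component_maps
instance (range_to_udpate : Int × Int) (component_maps : List (Int × Int × Int)) (out : List (Int × Int)) : Decidable (Spec_apply_component_maps_to_range range_to_udpate component_maps out) := by unfold Spec_apply_component_maps_to_range; infer_instance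

-- ===== CLAIM (what is proved, stated in full; the proofs are below) =====
def Claim_equal_apply_component_maps_to_range : Prop := ∀ (range_to_udpate : Int × Int) (component_maps : List (Int × Int × Int)), Dom_apply_component_maps_to_range range_to_udpate component_maps → Spec_apply_component_maps_to_range range_to_udpate component_maps (apply_component_maps_to_range range_to_udpate component_maps)

-- ===== LEMMAS AND PROOFS =====

-- meaning of one work item: what it eventually contributes to the output
def pvInterp : PvItem → List (Int × Int)
  | .emit t => [t]
  | .expand r maps => apply_component_maps_to_range r maps

theorem pvFindPush_interp (vs vl : Int) (maps : List (Int × Int × Int)) :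
    (pvFindPush vs vl maps).flatMap pvInterp = apply_component_maps_to_range (vs, vl) maps := by
  induction maps with
  | nil => simp [pvFindPush, pvInterp, apply_component_maps_to_range]
  | cons m rest ih =>
    obtain ⟨ds, ss, ln⟩ := m
    simp only [pvFindPush, apply_component_maps_to_range]
    split_ifs <;> simp_all [pvInterp] <;> ring

theorem pvRun_interp (s : List PvItem) (out : List (Int × Int)) :
    pvRun s out = out ++ s.flatMap pvInterp := by
  induction s, out using pvRun.induct with
  | case1 out => simp [pvRun]
  | case2 t rest out ih => simp [pvRun, pvInterp, ih]
  | case3 vs vl maps rest out ih =>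
    rw [pvRun, ih, List.flatMap_append, pvFindPush_interp]
    simp [pvInterp]

-- ===== VERDICT (by name: the statement is the Claim_ definition above) =====
theorem apply_component_maps_to_range_spec : Claim_equal_apply_component_maps_to_range := by
  intro r maps _
  show _ = _
  rw [apply_component_maps_to_range_alt, pvRun_interp]
  simp [pvInterp]
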